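-- pv_equiv track=rewrite | github.com/roman-gulida/bioinformatics | lab8/8_2.py | find_inverted_repeats
-- ===== SOURCE A (Python) =====
-- def reverse_complement(seq):
--     """Return reverse complement of DNA sequence"""
--     complement = {'A': 'T', 'T': 'A', 'G': 'C', 'C': 'G'}
--     return ''.join(complement.get(base, base) for base in reversed(seq))
--
-- def find_inverted_repeats(sequence, min_size=4, max_size=6):
--     """Find all inverted repeats in sequence"""
--     repeats = []
--     seq_len = len(sequence)
--
--     for size in range(min_size, max_size + 1):
--         for i in range(seq_len - size + 1):
--             left_ir = sequence[i:i + size]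
--             left_rc = reverse_complement(left_ir)
--
--             # Search for matching inverted repeat downstream
--             for j in range(i + size, seq_len - size + 1):
--                 right_ir = sequence[j:j + size]
--
--                 if left_rc == right_ir:
--                     repeats.append({
--                         'left_start': i,
--                         'left_end': i + size - 1,
--                         'right_start': j,
--                         'right_end': j + size - 1,
--                         'ir_size': size,
--                         'spacer_size': j - (i + size),
--                         'total_length': (j + size) - i
--                     })
--
--     return repeats
-- ===== SOURCE B (Python) =====
-- def reverse_complement(seq):
--     """Return reverse complement of DNA sequence"""
--     complement = {'A': 'T', 'T': 'A', 'G': 'C', 'C': 'G'}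
--     return ''.join(complement.get(base, base) for base in reversed(seq))
--
--
-- def _record(i, j, size):
--     return {
--         'left_start': i,
--         'left_end': i + size - 1,
--         'right_start': j,
--         'right_end': j + size - 1,
--         'ir_size': size,
--         'spacer_size': j - (i + size),
--         'total_length': (j + size) - i
--     }
--
--
-- def _matches(sequence, rc, n, size):
--     """All inverted repeats of one size, via a positions index instead of a rescan.
--     The reverse complement of sequence[i:i+size] is rc[n-i-size:n-i] (rc is the
--     reverse complement of the whole sequence), so no per-window RC is computed."""
--     index = {}
--     for j in range(n - size + 1):
--         index.setdefault(sequence[j:j + size], []).append(j)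
--     return [_record(i, j, size)
--             for i in range(n - size + 1)
--             for j in index.get(rc[n - i - size:n - i], [])
--             if j >= i + size]
--
--
-- def find_inverted_repeats(sequence, min_size=4, max_size=6):
--     """Find all inverted repeats in sequence"""
--     n = len(sequence)
--     rc = reverse_complement(sequence)
--     return [rec
--             for size in range(min_size, max_size + 1)
--             for rec in _matches(sequence, rc, n, size)]
-- ===== Notes on version B (the rewrite author's own statement) =====
-- stated objective: alternative
-- what changed: B computes the reverse complement of the whole sequence once (each left window's RC is then just a slice of it), builds per size a hash index from window substring to its ascending positions, and assembles the result with comprehensions staged into helper functions, replacing A's per-window RC computation and quadratic downstream rescan with index lookups.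
import Mathlib
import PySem

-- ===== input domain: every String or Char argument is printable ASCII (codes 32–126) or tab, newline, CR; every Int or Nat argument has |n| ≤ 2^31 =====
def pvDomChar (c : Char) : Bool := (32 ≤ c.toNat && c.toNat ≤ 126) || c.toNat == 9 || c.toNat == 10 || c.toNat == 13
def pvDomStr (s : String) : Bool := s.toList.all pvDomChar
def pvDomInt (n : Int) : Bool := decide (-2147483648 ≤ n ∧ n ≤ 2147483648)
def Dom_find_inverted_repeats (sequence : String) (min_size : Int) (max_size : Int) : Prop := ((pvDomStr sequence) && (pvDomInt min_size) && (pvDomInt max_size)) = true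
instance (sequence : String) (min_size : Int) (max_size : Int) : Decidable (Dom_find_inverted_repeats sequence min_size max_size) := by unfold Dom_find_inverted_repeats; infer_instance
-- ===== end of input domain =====

-- B computes the reverse complement of the whole sequence once (each left window's RC is a slice
-- of it), indexes window substrings by position per size, and assembles the result with staged
-- comprehensions, replacing A's per-window RC and downstream rescan (alternative).

-- ===== PORT A =====
-- complement = {'A': 'T', 'T': 'A', 'G': 'C', 'C': 'G'}  (same literal in both sources' reverse_complement)
def pvComplement : PySem.Dict Char Char :=
  ((((PySem.Dict.empty).insert 'A' 'T').insert 'T' 'A').insert 'G' 'C').insert 'C' 'G'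

-- reverse_complement(seq): ''.join(complement.get(base, base) for base in reversed(seq)) — both
-- sources contain this helper verbatim, so both ports share it
def pvRC (s : List Char) : List Char :=
  s.reverse.map (fun base => pvComplement.getD base base)

def find_inverted_repeats (sequence : String) (min_size : Int) (max_size : Int) : List (List (String × Int)) :=
  let cs := sequence.toList
  let seq_len : Int := PySem.Str.len sequence
  (PySem.List.pyRange min_size (max_size + 1) 1).foldl (fun repeats size =>
    (PySem.List.pyRange 0 (seq_len - size + 1) 1).foldl (fun repeats i =>
      let left_ir := PySem.List.slice cs (some i) (some (i + size))
      let left_rc := pvRC left_ir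
      (PySem.List.pyRange (i + size) (seq_len - size + 1) 1).foldl (fun repeats j =>
        let right_ir := PySem.List.slice cs (some j) (some (j + size))
        if left_rc == right_ir then
          repeats ++ [[("left_start", i), ("left_end", i + size - 1), ("right_start", j),
                       ("right_end", j + size - 1), ("ir_size", size),
                       ("spacer_size", j - (i + size)), ("total_length", (j + size) - i)]]
        else repeats) repeats) repeats) []

-- ===== PORT B =====
-- _record(i, j, size)
def pvRecord (i j size : Int) : List (String × Int) :=
  [("left_start", i), ("left_end", i + size - 1), ("right_start", j), ("right_end", j + size - 1),
   ("ir_size", size), ("spacer_size", j - (i + size)), ("total_length", (j + size) - i)]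

-- _matches(sequence, rc, n, size)
def pvMatches (cs rc : List Char) (n size : Int) : List (List (String × Int)) :=
  let index : PySem.Dict (List Char) (List Int) :=
    (PySem.List.pyRange 0 (n - size + 1) 1).foldl (fun d j =>
      d.modify (PySem.List.slice cs (some j) (some (j + size))) [] (· ++ [j])) PySem.Dict.empty
  (PySem.List.pyRange 0 (n - size + 1) 1).flatMap (fun i =>
    ((index.getD (PySem.List.slice rc (some (n - i - size)) (some (n - i))) []).filter
      (fun j => decide (i + size ≤ j))).map (fun j => pvRecord i j size))

def find_inverted_repeats_alt (sequence : String) (min_size : Int) (max_size : Int) : List (List (String × Int)) :=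
  let n : Int := PySem.Str.len sequence
  let rc := pvRC sequence.toList
  (PySem.List.pyRange min_size (max_size + 1) 1).flatMap (fun size =>
    pvMatches sequence.toList rc n size)

-- ===== PRECONDITION & SPEC =====
-- Pre_ excludes negative minimum window sizes, on which A's inner range(i+size, …) starts below zero
-- and Python's negative-index slicing makes A emit extra degenerate records at negative positions —
-- an accidental corner neither behaviour should be specified for; every input whose size loop only
-- visits nonnegative sizes (min_size ≥ 0, or an empty size range) is kept.
def Pre_find_inverted_repeats (_sequence : String) (min_size : Int) (max_size : Int) : Prop :=
  0 ≤ min_size ∨ max_size < min_size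
instance (sequence : String) (min_size : Int) (max_size : Int) : Decidable (Pre_find_inverted_repeats sequence min_size max_size) := by unfold Pre_find_inverted_repeats; infer_instance

def pvWitness_find_inverted_repeats : String × Int × Int := ("GAATTCGG", 4, 6)

def Spec_find_inverted_repeats (sequence : String) (min_size : Int) (max_size : Int) (out : List (List (String × Int))) : Prop := out = find_inverted_repeats_alt sequence min_size max_size
instance (sequence : String) (min_size : Int) (max_size : Int) (out : List (List (String × Int))) : Decidable (Spec_find_inverted_repeats sequence min_size max_size out) := by unfold Spec_find_inverted_repeats; infer_instance

-- ===== CLAIM (what is proved, stated in full; the proofs are below) =====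
def Claim_equal_find_inverted_repeats : Prop := ∀ (sequence : String) (min_size : Int) (max_size : Int), Dom_find_inverted_repeats sequence min_size max_size → Pre_find_inverted_repeats sequence min_size max_size → Spec_find_inverted_repeats sequence min_size max_size (find_inverted_repeats sequence min_size max_size)

-- ===== LEMMAS AND PROOFS =====

-- the positions index groups: looked up at c, it is exactly the ascending list of window starts whose window equals c
theorem pv_getD_positions (cs : List Char) (size m : Int) (c : List Char) :
    (((PySem.List.pyRange 0 m 1).foldl (fun d j =>
        d.modify (PySem.List.slice cs (some j) (some (j + size))) [] (· ++ [j])) PySem.Dict.empty).getD c [])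
    = (PySem.List.pyRange 0 m 1).filter (fun j => PySem.List.slice cs (some j) (some (j + size)) == c) := by
  rw [show ((PySem.List.pyRange 0 m 1).foldl (fun d j =>
        d.modify (PySem.List.slice cs (some j) (some (j + size))) [] (· ++ [j])) PySem.Dict.empty)
      = (((PySem.List.pyRange 0 m 1).map (fun j => (PySem.List.slice cs (some j) (some (j + size)), j))).foldl
          (fun d p => d.modify p.1 [] (· ++ [p.2])) PySem.Dict.empty)
      from (List.foldl_map (f := fun j => (PySem.List.slice cs (some j) (some (j + size)), j))
        (g := fun (d : PySem.Dict (List Char) (List Int)) (p : List Char × Int) =>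
          d.modify p.1 [] (· ++ [p.2]))).symm]
  rw [PySem.Dict.getD_foldl_modify_append]
  simp [List.filter_map, Function.comp_def, List.map_map]

-- filtering a from-0 range by a lower bound is the range from that bound
theorem pv_filter_range (c m : Int) (hc : 0 ≤ c) :
    (PySem.List.pyRange 0 m 1).filter (fun j => decide (c ≤ j)) = PySem.List.pyRange c m 1 := by
  by_cases h : c ≤ m
  · rw [PySem.List.pyRange_one_append 0 c m hc h, List.filter_append]
    rw [List.filter_eq_nil_iff.mpr, List.filter_eq_self.mpr]
    · simp
    · intro a ha; have := (PySem.List.mem_pyRange_one).mp ha; simpa using this.1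
    · intro a ha; have := (PySem.List.mem_pyRange_one).mp ha; simp; omega
  · rw [List.filter_eq_nil_iff.mpr, PySem.List.pyRange_one_eq_nil (by omega : m ≤ c)]
    intro a ha; have := (PySem.List.mem_pyRange_one).mp ha; simp; omega

-- the reverse complement of a window is the mirrored window of the whole-sequence reverse complement
theorem pv_drop_take_reverse (m : List Char) (a s : Nat) (h : a + s ≤ m.length) :
    List.take (m.length - a - (m.length - a - s)) (List.drop (m.length - a - s) m.reverse)
      = ((m.drop a).take s).reverse := by
  rw [List.drop_reverse, List.take_reverse]
  congr 1
  rw [show m.length - (m.length - a - s) = a + s by omega,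
      show m.length - a - (m.length - a - s) = s by omega]
  rw [List.length_take, show min (a + s) m.length - s = a by omega]
  rw [List.drop_take]
  congr 1
  omega

theorem pv_rc_slice (cs : List Char) (i size : Int) (hi : 0 ≤ i) (hs : 0 ≤ size)
    (hn : i + size ≤ (cs.length : Int)) :
    PySem.List.slice (pvRC cs) (some ((cs.length : Int) - i - size)) (some ((cs.length : Int) - i))
      = pvRC (PySem.List.slice cs (some i) (some (i + size))) := by
  obtain ⟨a, rfl⟩ := Int.eq_ofNat_of_zero_le hi
  obtain ⟨s, rfl⟩ := Int.eq_ofNat_of_zero_le hs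
  have hn' : a + s ≤ cs.length := by exact_mod_cast hn
  have ha : ((cs.length - a - s : Nat) : Int) = (cs.length : Int) - ↑a - ↑s := by omega
  have hb : ((cs.length - a : Nat) : Int) = (cs.length : Int) - ↑a := by omega
  rw [← ha, ← hb, PySem.List.slice_natCast, PySem.List.slice_natCast_add]
  unfold pvRC
  simp only [List.map_reverse, List.map_take, List.map_drop]
  have := pv_drop_take_reverse (cs.map fun base => pvComplement.getD base base) a s (by simpa using hn')
  simpa using this

-- the per-size bodies agree: A's nested rescan equals B's _matches for a nonnegative size
theorem pv_matches_eq (cs : List Char) (size : Int) (hs : 0 ≤ size) :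
    (PySem.List.pyRange 0 ((cs.length : Int) - size + 1) 1).flatMap (fun i =>
      ((PySem.List.pyRange (i + size) ((cs.length : Int) - size + 1) 1).filter
        (fun j => pvRC (PySem.List.slice cs (some i) (some (i + size)))
          == PySem.List.slice cs (some j) (some (j + size)))).map (fun j => pvRecord i j size))
    = pvMatches cs (pvRC cs) (cs.length : Int) size := by
  unfold pvMatches
  rw [List.flatMap_eq_foldl, List.flatMap_eq_foldl]
  apply PySem.List.foldl_congr_mem
  intro acc i hi
  have hi' := PySem.List.mem_pyRange_one.mp hi
  have hin : i + size ≤ (cs.length : Int) := by omega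
  rw [show (cs.length : Int) - i - size = (cs.length : Int) - i - size from rfl,
      pv_rc_slice cs i size hi'.1 hs hin, pv_getD_positions]
  congr 1
  rw [List.filter_filter]
  rw [show ((PySem.List.pyRange 0 ((cs.length : Int) - size + 1) 1).filter
        (fun j => decide (i + size ≤ j) &&
          (PySem.List.slice cs (some j) (some (j + size))
            == pvRC (PySem.List.slice cs (some i) (some (i + size))))))
      = (((PySem.List.pyRange 0 ((cs.length : Int) - size + 1) 1).filter
          (fun j => decide (i + size ≤ j))).filter
          (fun j => pvRC (PySem.List.slice cs (some i) (some (i + size)))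
            == PySem.List.slice cs (some j) (some (j + size))))
      from by rw [List.filter_filter]; apply List.filter_congr; intro a _;
              rw [Bool.and_comm]; simp [BEq.comm]]
  rw [pv_filter_range _ _ (by omega)]

-- ===== VERDICT (by name: the statement is the Claim_ definition above) =====
theorem find_inverted_repeats_spec : Claim_equal_find_inverted_repeats := by
  intro sequence min_size max_size _ hpre
  unfold Pre_find_inverted_repeats at hpre
  unfold Spec_find_inverted_repeats
  simp only [find_inverted_repeats, find_inverted_repeats_alt]
  rcases hpre with hpre | hpre
  case inr => rw [PySem.List.pyRange_one_eq_nil (by omega : max_size + 1 ≤ min_size)]; rfl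
  rw [List.flatMap_eq_foldl]
  apply PySem.List.foldl_congr_mem
  intro acc size hsize
  have hs0 : 0 ≤ size := le_trans hpre (PySem.List.mem_pyRange_one.mp hsize).1
  rw [PySem.List.foldl_congr_mem (g := fun acc i =>
        acc ++ ((PySem.List.pyRange (i + size) (PySem.Str.len sequence - size + 1) 1).filter
          (fun j => pvRC (PySem.List.slice sequence.toList (some i) (some (i + size)))
            == PySem.List.slice sequence.toList (some j) (some (j + size)))).map
          (fun j => pvRecord i j size))
      (h := by
        intro acc i _
        rw [PySem.List.foldl_append_if
          (p := fun j => pvRC (PySem.List.slice sequence.toList (some i) (some (i + size)))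
            == PySem.List.slice sequence.toList (some j) (some (j + size)))]
        simp [pvRecord])]
  rw [PySem.List.foldl_append_eq_flatMap]
  congr 1
  have hlen : PySem.Str.len sequence = (sequence.toList.length : Int) := by
    simp [PySem.Str.len_eq]
  rw [hlen]
  exact pv_matches_eq sequence.toList size hs0
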